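-- pv_equiv track=rewrite | github.com/chongguang/adventOfCode2018 | day2.py | count_times
-- ===== SOURCE A (Python) =====
-- def count_times(id):
--     occurrence = {}
--     for char in id:
--         if char in occurrence:
--             occurrence[char] = occurrence[char] + 1
--         else:
--             occurrence[char] = 1
--     res = []
--     if 2 in occurrence.values():
--         res.append(2)
--     if 3 in occurrence.values():
--         res.append(3)
--     return res
-- ===== SOURCE B (Python) =====
-- def count_times(id):
--     # Sort the characters, then scan the consecutive equal runs of the
--     # sorted list and collect the set of run lengths; a run's length is
--     # that character's total occurrence count.
--     s = sorted(id)
--     lengths = set()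
--     i = 0
--     n = len(s)
--     while i < n:
--         j = i
--         while j < n and s[j] == s[i]:
--             j += 1
--         lengths.add(j - i)
--         i = j
--     return [k for k in (2, 3) if k in lengths]
-- ===== Notes on version B (the rewrite author's own statement) =====
-- stated objective: alternative
-- what changed: Replaced the dict frequency accumulation plus two values() scans with a sort-then-group scan: B sorts the characters and collects the set of consecutive-run lengths, then filters (2, 3) by membership in that set.
import Mathlib
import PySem

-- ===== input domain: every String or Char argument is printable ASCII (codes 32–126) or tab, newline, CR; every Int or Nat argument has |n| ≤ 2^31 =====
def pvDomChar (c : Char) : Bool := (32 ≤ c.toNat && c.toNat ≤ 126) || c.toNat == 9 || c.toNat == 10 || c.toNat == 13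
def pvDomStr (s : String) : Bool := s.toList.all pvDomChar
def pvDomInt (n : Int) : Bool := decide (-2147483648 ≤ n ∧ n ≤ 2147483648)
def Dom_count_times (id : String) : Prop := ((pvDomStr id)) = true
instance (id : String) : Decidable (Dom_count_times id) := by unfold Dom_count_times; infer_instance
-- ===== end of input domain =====

-- B replaces the dict frequency count with a sort-then-group run-length scan (alternative algorithm, same results).

-- ===== PORT A =====
-- literal port of A: build the occurrence dict char by char, then append 2 and 3 to res
def count_times (id : String) : List Int :=
  let occurrence := id.toList.foldl (fun d char =>
    if d.contains char then d.insert char (d.getD char 0 + 1)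
    else d.insert char 1) (PySem.Dict.empty : PySem.Dict Char Int)
  let res : List Int := []
  let res := if occurrence.values.contains 2 then res ++ [2] else res
  let res := if occurrence.values.contains 3 then res ++ [3] else res
  res

-- ===== PORT B =====
-- inner while loop of Source B: length of the run of elements equal to the head (takeWhile),
-- outer loop resumes right after the run (dropWhile); exact for the two-pointer scan
def runLengths (l : List Char) : List Int :=
  match l with
  | [] => []
  | c :: rest =>
      (((rest.takeWhile (· == c)).length : Int) + 1) :: runLengths (rest.dropWhile (· == c))
termination_by l.length
decreasing_by
  simp only [List.length_cons]
  exact Nat.lt_succ_of_le (List.length_dropWhile_le _ _)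

def count_times_alt (id : String) : List Int :=
  let s := PySem.List.sorted id.toList (fun c => c) false
  let lengths := PySem.Set.ofList (runLengths s)
  ([2, 3] : List Int).filter (fun k => lengths.contains k)

-- ===== PRECONDITION & SPEC =====
def Spec_count_times (id : String) (out : List Int) : Prop := out = count_times_alt id
instance (id : String) (out : List Int) : Decidable (Spec_count_times id out) := by unfold Spec_count_times; infer_instance

-- ===== CLAIM (what is proved, stated in full; the proofs are below) =====
def Claim_equal_count_times : Prop := ∀ (id : String), Dom_count_times id → Spec_count_times id (count_times id)

-- ===== LEMMAS AND PROOFS =====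

-- A's branching fold is the Counter fold
lemma fold_eq_counter (xs : List Char) :
    xs.foldl (fun d char =>
      if d.contains char then d.insert char (d.getD char 0 + 1)
      else d.insert char 1) (PySem.Dict.empty : PySem.Dict Char Int) = PySem.Dict.counter xs := by
  rw [← PySem.Dict.foldl_insert_getD_add_one_eq_counter]
  congr 1
  funext d c
  by_cases h : d.contains c = true
  · simp [h]
  · have h0 : d.getD c 0 = 0 :=
      PySem.Dict.getD_of_not_contains _ _ (by simpa using h)
    simp [h, h0]

-- membership in the counter's values is "some char has that count"
lemma mem_values_counter (xs : List Char) (n : Int) :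
    (PySem.Dict.counter xs).values.contains n = true ↔ ∃ c ∈ xs, (xs.count c : Int) = n := by
  rw [PySem.Dict.values_eq_map_keys _ (PySem.Dict.nodup_keys_counter xs) 0]
  simp [PySem.Dict.keys_counter, PySem.Dict.getD_counter, PySem.Set.mem_ofList]

lemma not_mem_dropWhile_sorted (c : Char) (rest : List Char)
    (htail : rest.Pairwise (· ≤ ·)) (hle : ∀ y ∈ rest, c ≤ y) :
    c ∉ rest.dropWhile (· == c) := by
  intro hmem
  have hne : rest.dropWhile (· == c) ≠ [] := by
    intro hnil; rw [hnil] at hmem; exact (List.not_mem_nil) hmem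
  obtain ⟨d, t, hdt⟩ := List.exists_cons_of_ne_nil hne
  have hhead := List.head_dropWhile_not (fun y => y == c) hne
  have hd0 : (rest.dropWhile (· == c)).head hne = d := by
    have h1 : (rest.dropWhile (· == c)).head? = some d := by rw [hdt]; rfl
    rw [List.head?_eq_some_head hne] at h1
    exact Option.some.inj h1
  have hdc : d ≠ c := by
    rw [hd0] at hhead; simpa using hhead
  have hdrest : d ∈ rest := by
    have : d ∈ rest.dropWhile (· == c) := by rw [hdt]; exact List.mem_cons_self
    exact (List.dropWhile_sublist (· == c)).subset this
  have hcd : c < d := lt_of_le_of_ne (hle d hdrest) (Ne.symm hdc)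
  have hdpw : (rest.dropWhile (· == c)).Pairwise (· ≤ ·) :=
    htail.sublist (List.dropWhile_sublist (· == c))
  rw [hdt] at hmem hdpw
  rcases List.mem_cons.mp hmem with h1 | h1
  · exact absurd h1.symm hdc
  · exact absurd (((List.pairwise_cons.mp hdpw).1 c h1).trans_lt hcd) (lt_irrefl d)

lemma count_head_sorted (c : Char) (rest : List Char)
    (h : (c :: rest).Pairwise (· ≤ ·)) (x : Char) :
    (c :: rest).count x =
      if x = c then (rest.takeWhile (· == c)).length + 1
      else (rest.dropWhile (· == c)).count x := by
  have hle : ∀ y ∈ rest, c ≤ y := (List.pairwise_cons.mp h).1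
  have htail : rest.Pairwise (· ≤ ·) := (List.pairwise_cons.mp h).2
  have htake : ∀ y ∈ rest.takeWhile (· == c), y = c := by
    intro y hy
    have := List.mem_takeWhile_imp hy
    simpa using this
  have hrepl : rest.takeWhile (· == c) =
      List.replicate (rest.takeWhile (· == c)).length c :=
    (List.eq_replicate_length).2 htake
  have hnot : c ∉ rest.dropWhile (· == c) := not_mem_dropWhile_sorted c rest htail hle
  have hsplit : rest = rest.takeWhile (· == c) ++ rest.dropWhile (· == c) :=
    (List.takeWhile_append_dropWhile (p := (· == c)) (l := rest)).symm
  have hrestsplit : ∀ y : Char,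
      rest.count y = (rest.takeWhile (· == c)).count y + (rest.dropWhile (· == c)).count y := by
    intro y
    conv_lhs => rw [hsplit]
    rw [List.count_append]
  by_cases hx : x = c
  · have hdrop0 : (rest.dropWhile (· == c)).count c = 0 := List.count_eq_zero.2 hnot
    have htakec : (rest.takeWhile (· == c)).count c = (rest.takeWhile (· == c)).length := by
      conv_lhs => rw [hrepl]
      exact List.count_replicate_self
    rw [if_pos hx, hx, List.count_cons_self, hrestsplit, htakec, hdrop0]
  · have htake0 : (rest.takeWhile (· == c)).count x = 0 :=
      List.count_eq_zero.2 (fun hm => hx (htake x hm))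
    rw [if_neg hx, List.count_cons_of_ne (fun he => hx he.symm), hrestsplit, htake0, Nat.zero_add]

lemma mem_runLengths (l : List Char) (h : l.Pairwise (· ≤ ·)) (n : Int) :
    n ∈ runLengths l ↔ ∃ c ∈ l, (l.count c : Int) = n := by
  induction l using runLengths.induct with
  | case1 => simp [runLengths]
  | case2 c rest ih =>
    have hle : ∀ y ∈ rest, c ≤ y := (List.pairwise_cons.mp h).1
    have htail : rest.Pairwise (· ≤ ·) := (List.pairwise_cons.mp h).2
    have hdpw : (rest.dropWhile (· == c)).Pairwise (· ≤ ·) :=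
      htail.sublist (List.dropWhile_sublist (· == c))
    have hcount := count_head_sorted c rest h
    have hccount : ((c :: rest).count c : Int) =
        ((rest.takeWhile (· == c)).length : Int) + 1 := by
      rw [hcount c, if_pos rfl]; push_cast; ring
    have hnotdrop : c ∉ rest.dropWhile (· == c) := not_mem_dropWhile_sorted c rest htail hle
    rw [runLengths]
    constructor
    · intro hmem
      rcases List.mem_cons.mp hmem with hmem | hmem
      · exact ⟨c, List.mem_cons.mpr (Or.inl rfl), by rw [hccount, hmem]⟩
      · obtain ⟨d, hd, hdn⟩ := (ih hdpw).1 hmem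
        have hdne : d ≠ c := fun he => hnotdrop (he ▸ hd)
        refine ⟨d, List.mem_cons.mpr (Or.inr ((List.dropWhile_sublist (· == c)).subset hd)), ?_⟩
        rw [hcount d, if_neg hdne]
        exact hdn
    · rintro ⟨d, hd, hdn⟩
      by_cases hdc : d = c
      · subst hdc
        exact List.mem_cons.mpr (Or.inl (by rw [← hdn, hccount]))
      · refine List.mem_cons.mpr (Or.inr ?_)
        have hdrest : d ∈ rest := (List.mem_cons.mp hd).resolve_left hdc
        have hddrop : d ∈ rest.dropWhile (· == c) := by
          have hsplit : rest = rest.takeWhile (· == c) ++ rest.dropWhile (· == c) :=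
            (List.takeWhile_append_dropWhile (p := (· == c)) (l := rest)).symm
          rw [hsplit] at hdrest
          rcases List.mem_append.mp hdrest with h1 | h1
          · exact absurd (by simpa using List.mem_takeWhile_imp h1) hdc
          · exact h1
        refine (ih hdpw).2 ⟨d, hddrop, ?_⟩
        rw [hcount d, if_neg hdc] at hdn
        exact hdn

-- B's run-length membership is the same per-character-count condition
lemma mem_lengths_iff (xs : List Char) (n : Int) :
    (PySem.Set.ofList (runLengths (PySem.List.sorted xs (fun c => c) false))).contains n = true
      ↔ ∃ c ∈ xs, (xs.count c : Int) = n := by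
  set s := PySem.List.sorted xs (fun c => c) false with hs
  have hperm : s.Perm xs := PySem.List.sorted_perm xs (fun c => c) false
  have hpw : s.Pairwise (· ≤ ·) := by
    have := PySem.List.sorted_pairwise xs (fun c => c)
    simpa [hs] using this
  rw [PySem.Set.contains_iff, PySem.Set.mem_ofList, mem_runLengths s hpw n]
  constructor
  · rintro ⟨c, hc, hcn⟩
    exact ⟨c, hperm.mem_iff.mp hc, by rw [← hperm.count_eq]; exact hcn⟩
  · rintro ⟨c, hc, hcn⟩
    exact ⟨c, hperm.mem_iff.mpr hc, by rw [hperm.count_eq]; exact hcn⟩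

-- ===== VERDICT (by name: the statement is the Claim_ definition above) =====
theorem count_times_spec : Claim_equal_count_times := by
  intro id _
  unfold Spec_count_times
  have h2 := (mem_values_counter id.toList 2).trans (mem_lengths_iff id.toList 2).symm
  have h3 := (mem_values_counter id.toList 3).trans (mem_lengths_iff id.toList 3).symm
  have e2 : (PySem.Dict.counter id.toList).values.contains 2 =
      (PySem.Set.ofList (runLengths (PySem.List.sorted id.toList (fun c => c) false))).contains 2 :=
    Bool.eq_iff_iff.mpr h2
  have e3 : (PySem.Dict.counter id.toList).values.contains 3 =
      (PySem.Set.ofList (runLengths (PySem.List.sorted id.toList (fun c => c) false))).contains 3 :=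
    Bool.eq_iff_iff.mpr h3
  simp only [count_times, count_times_alt, fold_eq_counter, List.filter_cons, List.filter_nil, e2, e3]
  cases (PySem.Set.ofList (runLengths (PySem.List.sorted id.toList (fun c => c) false))).contains 2 <;>
  cases (PySem.Set.ofList (runLengths (PySem.List.sorted id.toList (fun c => c) false))).contains 3 <;>
    simp
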